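-- pv_equiv track=rewrite | github.com/TransformedGod/algorythms | task_2_2.py | func
-- ===== SOURCE A (Python) =====
-- def func(i):
--     plains = []
--     q = i * 2
--     while len(plains) < i - 1:
--         q *= 2
--         for m in range(2, q):
--             mark = ""
--             for j in range(2, i + 1):
--                 if m % j == 0 and m != j:
--                     mark = False
--             if mark != False and m not in plains:
--                 plains.append(m)
--     return plains
-- ===== SOURCE B (Python) =====
-- def func(i):
--     if i < 2:
--         return []
--
--     def plain(m):
--         d = 2
--         while d <= i and d * d <= m:
--             if m % d == 0:
--                 return False
--             d += 1
--         return True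
--
--     # stage 1: find the final scan bound q by counting, never storing the list
--     cnt = sum(1 for m in range(2, 4 * i) if plain(m))
--     q = 4 * i
--     while cnt < i - 1:
--         cnt += sum(1 for m in range(q, 2 * q) if plain(m))
--         q *= 2
--     # stage 2: emit all plain numbers below the final bound in one pass
--     return [m for m in range(2, q) if plain(m)]
-- ===== Notes on version B (the rewrite author's own statement) =====
-- stated objective: faster
-- what changed: A repeatedly rescans the whole candidate range from scratch after every doubling of the bound, sweeping every potential divisor up to i for each candidate and doing a linear membership test; B first finds the final bound in a counting pass that visits each candidate once, testing it by trial division only up to min(i, sqrt(m)), and then emits the list with a single filter pass.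
import Mathlib
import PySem

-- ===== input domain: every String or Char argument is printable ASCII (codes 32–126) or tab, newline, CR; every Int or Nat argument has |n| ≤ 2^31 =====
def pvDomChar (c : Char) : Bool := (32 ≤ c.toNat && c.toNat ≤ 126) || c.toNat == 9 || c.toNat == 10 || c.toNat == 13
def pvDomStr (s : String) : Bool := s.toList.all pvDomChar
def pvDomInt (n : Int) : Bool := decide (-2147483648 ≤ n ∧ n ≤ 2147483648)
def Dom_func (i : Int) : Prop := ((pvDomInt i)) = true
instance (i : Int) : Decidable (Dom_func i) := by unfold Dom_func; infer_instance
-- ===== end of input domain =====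

-- B replaces A's repeated full-range rescans by a counting pass that finds the final
-- bound q (trial division up to min(i, sqrt m)) followed by one emitting filter pass;
-- measured asymptotically faster, same return value for every int i.

-- ===== PORT A =====
-- A's inner j-loop computing `mark` (true ⇔ m has no divisor j ∈ [2,i] with j ≠ m)
def markA (i m : Int) : Bool :=
  (PySem.List.pyRange 2 (i + 1) 1).foldl
    (fun mark j => if PySem.Int.mod m j = 0 ∧ m ≠ j then false else mark) true

-- A's `for m in range(2, q)` pass: append every new m whose mark survived
def passA (i : Int) (plains : List Int) (q : Int) : List Int :=
  (PySem.List.pyRange 2 q 1).foldl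
    (fun acc m => if markA i m && !acc.contains m then acc ++ [m] else acc) plains

-- A's while-loop as written (double q, rescan [2,q)); the fuel only makes the
-- recursion total — the proofs below show it is never exhausted for fuel = i.toNat
def loopA (i : Int) : List Int → Int → ℕ → List Int
  | plains, _, 0 => plains
  | plains, q, Nat.succ n =>
      if (plains.length : Int) < i - 1 then loopA i (passA i plains (2 * q)) (2 * q) n
      else plains

def func (i : Int) : List Int := loopA i [] (2 * i) i.toNat

-- ===== PORT B =====
-- B's trial-division test `plain(m)`, dividing only up to min(i, sqrt m)
def plainB (i m d : Int) : Bool :=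
  if h : d ≤ i ∧ d * d ≤ m then
    (if PySem.Int.mod m d = 0 then false else plainB i m (d + 1))
  else true
termination_by (i + 1 - d).toNat
decreasing_by omega

-- B's `sum(1 for m in range(a,b) if plain(m))`
def blockCount (i a b : Int) : Int :=
  (((PySem.List.pyRange a b 1).filter (fun m => plainB i m 2)).length : Int)

-- B's stage-1 while-loop: carry only the count, return the final bound q
def loopQ (i : Int) : Int → Int → ℕ → Int
  | _, q, 0 => q
  | cnt, q, Nat.succ n =>
      if cnt < i - 1 then loopQ i (cnt + blockCount i q (2 * q)) (2 * q) n
      else q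

def func_alt (i : Int) : List Int :=
  if i < 2 then []
  else
    (PySem.List.pyRange 2 (loopQ i (blockCount i 2 (4 * i)) (4 * i) i.toNat) 1).filter
      (fun m => plainB i m 2)

-- ===== PRECONDITION & SPEC =====
def Spec_func (i : Int) (out : List Int) : Prop := out = func_alt i
instance (i : Int) (out : List Int) : Decidable (Spec_func i out) := by unfold Spec_func; infer_instance

-- ===== CLAIM (what is proved, stated in full; the proofs are below) =====
def Claim_equal_func : Prop := ∀ (i : Int), Dom_func i → Spec_func i (func i)

-- ===== LEMMAS AND PROOFS =====

-- canonical description of both loops' progress: all "plain" numbers in [2, c)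
def plainsUpTo (i c : Int) : List Int :=
  (PySem.List.pyRange 2 c 1).filter (fun m => plainB i m 2)

theorem plainB_iff_aux (i m : Int) :
    ∀ (n : ℕ) (d : Int), 2 ≤ d → (i + 1 - d).toNat ≤ n →
      (plainB i m d = true ↔ ∀ e, d ≤ e → e ≤ i → e * e ≤ m → PySem.Int.mod m e ≠ 0) := by
  intro n
  induction n with
  | zero =>
    intro d hd hn
    rw [plainB, dif_neg (by omega : ¬ (d ≤ i ∧ d * d ≤ m))]
    constructor
    · intro _ e he hei _; omega
    · intro _; rfl
  | succ n ih =>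
    intro d hd hn
    rw [plainB]
    by_cases hg : d ≤ i ∧ d * d ≤ m
    · rw [dif_pos hg]
      by_cases hmod : PySem.Int.mod m d = 0
      · simp only [hmod, if_true]
        constructor
        · intro h; exact absurd h (by simp)
        · intro h; exact absurd hmod (h d le_rfl hg.1 hg.2)
      · simp only [hmod, if_false]
        rw [ih (d + 1) (by omega) (by omega)]
        constructor
        · intro h e he hei hee hm
          rcases eq_or_lt_of_le he with rfl | hlt
          · exact hmod hm
          · exact h e (by omega) hei hee hm
        · intro h e he hei hee hm
          exact h e (by omega) hei hee hm
    · rw [dif_neg hg]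
      constructor
      · intro _ e he hei hee _
        apply hg
        constructor
        · omega
        · nlinarith
      · intro _; rfl

theorem plainB_iff (i m : Int) :
    plainB i m 2 = true ↔ ∀ e, 2 ≤ e → e ≤ i → e * e ≤ m → PySem.Int.mod m e ≠ 0 :=
  plainB_iff_aux i m (i + 1 - 2).toNat 2 (by omega) le_rfl

theorem foldl_sticky (P : Int → Prop) [DecidablePred P] (l : List Int) (b : Bool) :
    l.foldl (fun mark j => if P j then false else mark) b
      = (b && !(l.any fun j => decide (P j))) := by
  induction l generalizing b with
  | nil => simp
  | cons a l ih =>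
    simp only [List.foldl_cons, List.any_cons, ih]
    by_cases h : P a <;> simp [h]

theorem markA_iff (i m : Int) :
    markA i m = true ↔ ∀ j, 2 ≤ j → j ≤ i → PySem.Int.mod m j = 0 → m = j := by
  unfold markA
  rw [foldl_sticky (fun j => PySem.Int.mod m j = 0 ∧ m ≠ j)]
  simp only [Bool.true_and, Bool.not_eq_true', List.any_eq_false, decide_eq_true_eq,
    PySem.List.mem_pyRange_one, not_and, ne_eq, not_not]
  constructor
  · intro h j h2 hi hmod
    exact h j ⟨h2, by omega⟩ hmod
  · intro h j hj hmod
    exact h j hj.1 (by omega) hmod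

theorem markA_eq_plainB (i m : Int) (hm : 2 ≤ m) : markA i m = plainB i m 2 := by
  have hiff : (markA i m = true) ↔ (plainB i m 2 = true) := by
    rw [markA_iff, plainB_iff]
    constructor
    · intro h e h2 hei hee hmod
      have := h e h2 hei hmod
      nlinarith
    · intro h j h2 hji hmod
      by_contra hne
      have hdvd : j ∣ m := (PySem.Int.mod_eq_zero_iff_dvd m j).mp hmod
      have hjm : j ≤ m := Int.le_of_dvd (by omega) hdvd
      have hjlt : j < m := lt_of_le_of_ne hjm (by omega)
      by_cases hsq : j * j ≤ m
      · exact h j h2 hji hsq hmod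
      · obtain ⟨k, hk⟩ := hdvd
        have hkpos : 0 < k := by nlinarith
        have hk2 : 2 ≤ k := by
          rcases (by omega : k = 1 ∨ 2 ≤ k) with rfl | h2k
          · omega
          · exact h2k
        have hklt : k < j := by nlinarith
        have hkk : k * k ≤ m := by nlinarith
        have hkdvd : k ∣ m := ⟨j, by linarith [hk]⟩
        exact h k hk2 (by omega) hkk ((PySem.Int.mod_eq_zero_iff_dvd m k).mpr hkdvd)
  cases ha : markA i m <;> cases hb : plainB i m 2 <;> simp_all

theorem plainB_two (i : Int) : plainB i 2 2 = true := by
  rw [plainB, dif_neg (by omega : ¬ ((2:Int) ≤ i ∧ (2:Int) * 2 ≤ 2))]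

theorem plainB_prime (i : Int) (p : ℕ) (hp : p.Prime) : plainB i (p : Int) 2 = true := by
  rw [plainB_iff]
  intro e h2 _ hee hmod
  have hdvd : e ∣ (p : Int) := (PySem.Int.mod_eq_zero_iff_dvd _ e).mp hmod
  have he : e = (e.toNat : Int) := by omega
  have hnd : e.toNat ∣ p := by
    rw [← Int.natCast_dvd_natCast, ← he]; exact hdvd
  rcases (Nat.Prime.eq_one_or_self_of_dvd hp _ hnd) with h1 | hself
  · omega
  · have : e = (p : Int) := by omega
    subst this
    nlinarith

theorem plainsUpTo_split (i a b : Int) (h1 : 2 ≤ a) (h2 : a ≤ b) :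
    plainsUpTo i b
      = plainsUpTo i a ++ (PySem.List.pyRange a b 1).filter (fun m => plainB i m 2) := by
  unfold plainsUpTo
  rw [PySem.List.pyRange_one_append 2 a b h1 h2, List.filter_append]

theorem passA_extend (i : Int) :
    ∀ (n : ℕ) (c b : Int), 2 ≤ c → c ≤ b → (b - c).toNat ≤ n →
      (PySem.List.pyRange c b 1).foldl
        (fun acc m => if markA i m && !acc.contains m then acc ++ [m] else acc)
        (plainsUpTo i c) = plainsUpTo i b := by
  intro n
  induction n with
  | zero =>
    intro c b hc hcb hn
    have : b = c := by omega
    subst this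
    rw [PySem.List.pyRange_one_eq_nil le_rfl]
    rfl
  | succ n ih =>
    intro c b hc hcb hn
    rcases eq_or_lt_of_le hcb with rfl | hlt
    · rw [PySem.List.pyRange_one_eq_nil le_rfl]; rfl
    · rw [PySem.List.pyRange_one_cons hlt]
      simp only [List.foldl_cons]
      have hnotmem : (plainsUpTo i c).contains c = false := by
        simp only [List.contains_eq_mem, decide_eq_false_iff_not]
        intro hmem
        have h1 := List.mem_filter.mp hmem
        have h2 := PySem.List.mem_pyRange_one.mp h1.1
        omega
      have hsucc : plainsUpTo i (c + 1)
          = plainsUpTo i c ++ (if plainB i c 2 then [c] else []) := by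
        unfold plainsUpTo
        rw [PySem.List.pyRange_one_succ_right hc, List.filter_append]
        congr 1
        by_cases h : plainB i c 2 = true <;> simp [h]
      have hstate :
          (if markA i c && !(plainsUpTo i c).contains c
            then plainsUpTo i c ++ [c] else plainsUpTo i c) = plainsUpTo i (c + 1) := by
        rw [markA_eq_plainB i c hc, hnotmem, hsucc]
        by_cases hpl : plainB i c 2 = true
        · simp [hpl]
        · simp [hpl]
      rw [hstate]
      exact ih (c + 1) b (by omega) (by omega) (by omega)

theorem passA_skip (i q : Int) :
    ∀ (n : ℕ) (a : Int), 2 ≤ a → (q - a).toNat ≤ n →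
      (PySem.List.pyRange a q 1).foldl
        (fun acc m => if markA i m && !acc.contains m then acc ++ [m] else acc)
        (plainsUpTo i q) = plainsUpTo i q := by
  intro n
  induction n with
  | zero =>
    intro a ha hn
    rw [PySem.List.pyRange_one_eq_nil (by omega)]
    rfl
  | succ n ih =>
    intro a ha hn
    by_cases hlt : a < q
    · rw [PySem.List.pyRange_one_cons hlt]
      simp only [List.foldl_cons]
      have hstate :
          (if markA i a && !(plainsUpTo i q).contains a
            then plainsUpTo i q ++ [a] else plainsUpTo i q) = plainsUpTo i q := by
        rw [markA_eq_plainB i a ha]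
        by_cases hpl : plainB i a 2 = true
        · have hmem : a ∈ plainsUpTo i q :=
            List.mem_filter.mpr ⟨PySem.List.mem_pyRange_one.mpr ⟨ha, hlt⟩, hpl⟩
          simp [hpl, hmem]
        · simp [hpl]
      rw [hstate]
      exact ih (a + 1) (by omega) (by omega)
    · rw [PySem.List.pyRange_one_eq_nil (by omega)]
      rfl

theorem passA_eq (i q : Int) (hq : 2 ≤ q) :
    passA i (plainsUpTo i q) (2 * q) = plainsUpTo i (2 * q) := by
  unfold passA
  rw [PySem.List.pyRange_one_append 2 q (2 * q) hq (by omega), List.foldl_append,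
    passA_skip i q (q - 2).toNat 2 (by omega) (by omega),
    passA_extend i (2 * q - q).toNat q (2 * q) hq (by omega) (by omega)]

theorem passA_empty (i b : Int) (hb : 2 ≤ b) : passA i [] b = plainsUpTo i b := by
  unfold passA
  have h0 : ([] : List Int) = plainsUpTo i 2 := by
    unfold plainsUpTo
    rw [PySem.List.pyRange_one_eq_nil le_rfl]
    rfl
  rw [h0]
  exact passA_extend i (b - 2).toNat 2 b le_rfl hb (by omega)

-- Bertrand: each doubling strictly grows the collection (a new prime in (q, 2q))
theorem plainsUpTo_grow (i q : Int) (hq : 2 ≤ q) :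
    (plainsUpTo i q).length < (plainsUpTo i (2 * q)).length := by
  obtain ⟨p, hp, hlt, hle⟩ := Nat.exists_prime_lt_and_le_two_mul q.toNat (by omega)
  have hmem : (p : Int) ∈ (PySem.List.pyRange q (2 * q) 1).filter (fun m => plainB i m 2) := by
    apply List.mem_filter.mpr
    have hpne : p ≠ 2 * q.toNat := by
      rintro rfl
      have h2 : (2 : ℕ) ∣ 2 * q.toNat := ⟨q.toNat, rfl⟩
      rcases (Nat.Prime.eq_one_or_self_of_dvd hp 2 h2) with h | h <;> omega
    constructor
    · apply PySem.List.mem_pyRange_one.mpr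
      constructor <;> omega
    · simp [plainB_prime i p hp]
  rw [plainsUpTo_split i q (2 * q) hq (by omega), List.length_append]
  have : 0 < ((PySem.List.pyRange q (2 * q) 1).filter (fun m => plainB i m 2)).length :=
    List.length_pos_of_mem hmem
  omega

theorem plainsUpTo_pos (i b : Int) (hb : 3 ≤ b) : 0 < (plainsUpTo i b).length := by
  apply List.length_pos_of_mem (a := (2 : Int))
  apply List.mem_filter.mpr
  refine ⟨PySem.List.mem_pyRange_one.mpr ⟨le_rfl, by omega⟩, by simp [plainB_two]⟩

-- counting a fresh block extends the count of the canonical list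
theorem countQ_step (i q : Int) (hq : 2 ≤ q) :
    ((plainsUpTo i q).length : Int) + blockCount i q (2 * q)
      = ((plainsUpTo i (2 * q)).length : Int) := by
  rw [plainsUpTo_split i q (2 * q) hq (by omega)]
  simp only [blockCount, List.length_append]
  push_cast
  ring

-- with equal fuel the two loops run in lockstep
theorem loops_lock (i : Int) :
    ∀ (n : ℕ) (q : Int), 2 ≤ q →
      loopA i (plainsUpTo i q) q n
        = (PySem.List.pyRange 2
            (loopQ i ((plainsUpTo i q).length : Int) q n) 1).filter (fun m => plainB i m 2) := by
  intro n
  induction n with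
  | zero => intro q hq; rfl
  | succ n ih =>
    intro q hq
    show (if ((plainsUpTo i q).length : Int) < i - 1
          then loopA i (passA i (plainsUpTo i q) (2 * q)) (2 * q) n
          else plainsUpTo i q) = _
    by_cases hg : ((plainsUpTo i q).length : Int) < i - 1
    · rw [if_pos hg, passA_eq i q hq, ih (2 * q) (by omega)]
      have hQ : loopQ i ((plainsUpTo i q).length : Int) q (n + 1)
          = loopQ i (((plainsUpTo i q).length : Int) + blockCount i q (2 * q)) (2 * q) n := by
        show (if ((plainsUpTo i q).length : Int) < i - 1 then _ else q) = _
        rw [if_pos hg]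
      rw [hQ, countQ_step i q hq]
    · rw [if_neg hg]
      have hQ : loopQ i ((plainsUpTo i q).length : Int) q (n + 1) = q := by
        show (if ((plainsUpTo i q).length : Int) < i - 1 then _ else q) = q
        rw [if_neg hg]
      rw [hQ]
      rfl

-- loopQ's value does not depend on the fuel once the fuel covers the measure
theorem loopQ_stable (i : Int) :
    ∀ (n m : ℕ) (cnt q : Int), cnt = ((plainsUpTo i q).length : Int) → 2 ≤ q →
      (i - 1 - cnt).toNat ≤ n → (i - 1 - cnt).toNat ≤ m →
      loopQ i cnt q n = loopQ i cnt q m := by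
  intro n
  induction n with
  | zero =>
    intro m cnt q hc hq hn hm
    have hg : ¬ cnt < i - 1 := by omega
    cases m with
    | zero => rfl
    | succ m => show q = (if cnt < i - 1 then _ else q); rw [if_neg hg]
  | succ n ih =>
    intro m cnt q hc hq hn hm
    by_cases hg : cnt < i - 1
    · cases m with
      | zero => omega
      | succ m =>
        show (if cnt < i - 1 then _ else q) = (if cnt < i - 1 then _ else q)
        rw [if_pos hg, if_pos hg]
        have hstep := countQ_step i q hq
        have hgrow := plainsUpTo_grow i q hq
        have hc' : cnt + blockCount i q (2 * q) = ((plainsUpTo i (2 * q)).length : Int) := by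
          rw [hc]; exact hstep
        have hlt : cnt < cnt + blockCount i q (2 * q) := by omega
        exact ih m (cnt + blockCount i q (2 * q)) (2 * q) hc' (by omega) (by omega) (by omega)
    · cases m with
      | zero => show (if cnt < i - 1 then _ else q) = q; rw [if_neg hg]
      | succ m =>
        show (if cnt < i - 1 then _ else q) = (if cnt < i - 1 then _ else q)
        rw [if_neg hg, if_neg hg]

-- ===== VERDICT (by name: the statement is the Claim_ definition above) =====
theorem func_spec : Claim_equal_func := by
  intro i _
  unfold Spec_func
  show func i = func_alt i
  unfold func func_alt
  by_cases hi : i < 2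
  · rw [if_pos hi]
    cases h : i.toNat with
    | zero => rfl
    | succ n =>
      show (if (([] : List Int).length : Int) < i - 1 then _ else ([] : List Int)) = []
      rw [if_neg (by simp; omega)]
  · rw [if_neg hi]
    obtain ⟨n, hn⟩ : ∃ n, i.toNat = n + 1 := ⟨i.toNat - 1, by omega⟩
    rw [hn]
    show (if (([] : List Int).length : Int) < i - 1
          then loopA i (passA i [] (2 * (2 * i))) (2 * (2 * i)) n
          else ([] : List Int)) = _
    rw [if_pos (by simp; omega)]
    have e4 : 2 * (2 * i) = 4 * i := by ring
    rw [e4, passA_empty i (4 * i) (by omega), loops_lock i n (4 * i) (by omega)]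
    have hbc : blockCount i 2 (4 * i) = ((plainsUpTo i (4 * i)).length : Int) := rfl
    rw [hbc]
    have hc0 : 0 < (plainsUpTo i (4 * i)).length := plainsUpTo_pos i (4 * i) (by omega)
    rw [loopQ_stable i n (n + 1) ((plainsUpTo i (4 * i)).length : Int) (4 * i) rfl
      (by omega) (by omega) (by omega)]
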